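-- pv_equiv track=rewrite | github.com/ShyLoon/Pract2 | Pr2.py | summa
-- ===== SOURCE A (Python) =====
-- def summa(month):
--     i = 1
--     month += 1
--     itog = 0
--     for i in range(month):
--         if (month < 10):
--             itog += i
--         else: itog += (i // 10) + (i % 10)
--     return itog
-- ===== SOURCE B (Python) =====
-- def summa(month):
--     # O(1) closed form: triangular number in the small branch, else full-decade cycle formulas.
--     n = month + 1
--     if n <= 0:
--         return 0
--     if n < 10:
--         return n * (n - 1) // 2
--     q, r = divmod(n, 10)
--     return 45 * q + r * (r - 1) // 2 + 10 * (q * (q - 1) // 2) + q * r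
-- ===== Notes on version B (the rewrite author's own statement) =====
-- stated objective: faster
-- what changed: Replaces the O(n) loop with O(1) closed forms: a triangular-number formula in the small-month branch, otherwise full-decade cycle formulas for the sums of the tens digit and the ones digit.
import Mathlib
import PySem

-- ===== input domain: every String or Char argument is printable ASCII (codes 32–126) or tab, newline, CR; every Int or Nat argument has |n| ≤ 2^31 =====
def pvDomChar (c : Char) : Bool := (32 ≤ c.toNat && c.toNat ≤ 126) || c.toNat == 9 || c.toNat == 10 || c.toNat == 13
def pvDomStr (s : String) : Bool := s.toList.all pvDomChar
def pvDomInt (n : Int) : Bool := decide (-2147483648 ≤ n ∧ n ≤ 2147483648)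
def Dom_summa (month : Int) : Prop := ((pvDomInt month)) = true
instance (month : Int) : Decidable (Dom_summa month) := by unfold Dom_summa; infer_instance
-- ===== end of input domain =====

-- B replaces A's O(n) loop with O(1) closed-form formulas; return values proved equal.

-- ===== PORT A =====
def summa (month : Int) : Int :=
  let month := month + 1
  (PySem.List.pyRange 0 month 1).foldl
    (fun itog i =>
      if month < 10 then itog + i
      else itog + (PySem.Int.floordiv i 10 + PySem.Int.mod i 10)) 0

-- ===== PORT B =====
def summa_alt (month : Int) : Int :=
  let n := month + 1
  if n ≤ 0 then 0
  else if n < 10 then PySem.Int.floordiv (n * (n - 1)) 2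
  else
    let q := PySem.Int.floordiv n 10
    let r := PySem.Int.mod n 10
    45 * q + PySem.Int.floordiv (r * (r - 1)) 2
      + 10 * (PySem.Int.floordiv (q * (q - 1)) 2) + q * r

-- ===== PRECONDITION & SPEC =====
def Spec_summa (month : Int) (out : Int) : Prop := out = summa_alt month
instance (month : Int) (out : Int) : Decidable (Spec_summa month out) := by unfold Spec_summa; infer_instance

-- ===== CLAIM (what is proved, stated in full; the proofs are below) =====
def Claim_equal_summa : Prop := ∀ (month : Int), Dom_summa month → Spec_summa month (summa month)

-- ===== LEMMAS AND PROOFS =====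

-- triangular step: (k+1)*k/2 = k*(k-1)/2 + k for integers
theorem tri_step (k : Int) :
    (k + 1) * ((k + 1) - 1) / 2 = k * (k - 1) / 2 + k := by
  obtain ⟨t, ht⟩ : ∃ t, (k - 1) * ((k - 1) + 1) = t + t := Int.even_mul_succ_self (k - 1)
  have ht' : k * (k - 1) = t + t := by linear_combination ht
  have h1 : (k + 1) * ((k + 1) - 1) = t + t + 2 * k := by linear_combination ht
  rw [ht', h1]; omega

-- Sum of i over range(0,n)
theorem sum_pyRange_id (m : Nat) :
    ((PySem.List.pyRange 0 (m : Int) 1).map (fun i => i)).sum = (m : Int) * ((m : Int) - 1) / 2 := by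
  induction m with
  | zero => simp [PySem.List.pyRange_one_eq_nil]
  | succ k ih =>
    have h : ((k : Int) + 1) = ((k + 1 : Nat) : Int) := by push_cast; ring
    rw [← h, PySem.List.pyRange_one_succ_right (by positivity)]
    simp only [List.map_append, List.sum_append, List.map_cons, List.map_nil, List.sum_cons,
      List.sum_nil, ih]
    rw [tri_step]; ring

def digitForm (n : Int) : Int :=
  45 * (n / 10) + (n % 10) * ((n % 10) - 1) / 2
    + 10 * ((n / 10) * ((n / 10) - 1) / 2) + (n / 10) * (n % 10)

-- one step of the digit-sum closed form
theorem digit_step (k : Int) :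
    digitForm (k + 1) = digitForm k + (k / 10 + k % 10) := by
  obtain ⟨q, r, hqr, hr0, hr9⟩ : ∃ q r, k = 10 * q + r ∧ 0 ≤ r ∧ r < 10 :=
    ⟨k / 10, k % 10, by omega, by omega, by omega⟩
  unfold digitForm
  rcases lt_or_ge r 9 with h9 | h9
  · have hd : (k + 1) / 10 = q ∧ (k + 1) % 10 = r + 1 ∧ k / 10 = q ∧ k % 10 = r := by omega
    rw [hd.1, hd.2.1, hd.2.2.1, hd.2.2.2]
    interval_cases r <;> omega
  · have hr : r = 9 := by omega
    subst hr
    have hd : (k + 1) / 10 = q + 1 ∧ (k + 1) % 10 = 0 ∧ k / 10 = q ∧ k % 10 = 9 := by omega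
    rw [hd.1, hd.2.1, hd.2.2.1, hd.2.2.2]
    obtain ⟨t, ht⟩ : ∃ t, (q - 1) * ((q - 1) + 1) = t + t := Int.even_mul_succ_self (q - 1)
    have ht' : q * (q - 1) = t + t := by linear_combination ht
    have h1 : (q + 1) * ((q + 1) - 1) = t + t + 2 * q := by linear_combination ht
    rw [ht', h1]; omega

-- Sum of i//10 + i%10 over range(0,n)
theorem sum_pyRange_digits (m : Nat) :
    ((PySem.List.pyRange 0 (m : Int) 1).map
      (fun i => PySem.Int.floordiv i 10 + PySem.Int.mod i 10)).sum = digitForm (m : Int) := by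
  induction m with
  | zero => simp [PySem.List.pyRange_one_eq_nil, digitForm]
  | succ k ih =>
    have h : ((k : Int) + 1) = ((k + 1 : Nat) : Int) := by push_cast; ring
    rw [← h, PySem.List.pyRange_one_succ_right (by positivity)]
    simp only [List.map_append, List.sum_append, List.map_cons, List.map_nil, List.sum_cons,
      List.sum_nil, ih,
      PySem.Int.floordiv_eq_ediv_of_pos (a := (k : Int)) (by norm_num : (0:Int) < 10),
      PySem.Int.mod_eq_emod_of_pos (a := (k : Int)) (by norm_num : (0:Int) < 10)]
    rw [digit_step (k : Int)]; ring

-- ===== VERDICT (by name: the statement is the Claim_ definition above) =====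
theorem summa_spec : Claim_equal_summa := by
  intro month _
  unfold Spec_summa
  simp only [summa, summa_alt]
  generalize month + 1 = n
  by_cases hpos : n ≤ 0
  · rw [PySem.List.pyRange_one_eq_nil hpos]
    simp [hpos]
  · rw [not_le] at hpos
    obtain ⟨m, hm⟩ : ∃ m : Nat, n = (m : Int) := ⟨n.toNat, by omega⟩
    subst hm
    by_cases hlt : (m : Int) < 10
    · have hbody : (fun (itog i : Int) =>
          if (m : Int) < 10 then itog + i
          else itog + (PySem.Int.floordiv i 10 + PySem.Int.mod i 10)) =
          fun (itog i : Int) => itog + (fun (i : Int) => i) i := by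
        funext a b; rw [if_pos hlt]
      rw [hbody, PySem.List.foldl_add (g := fun (i : Int) => i), sum_pyRange_id,
        if_neg (by omega : ¬ (m : Int) ≤ 0), if_pos hlt,
        PySem.Int.floordiv_eq_ediv_of_pos (by norm_num : (0:Int) < 2)]
      ring
    · have hbody : (fun (itog i : Int) =>
          if (m : Int) < 10 then itog + i
          else itog + (PySem.Int.floordiv i 10 + PySem.Int.mod i 10)) =
          fun (itog i : Int) => itog + (fun (i : Int) => PySem.Int.floordiv i 10 + PySem.Int.mod i 10) i := by
        funext a b; rw [if_neg hlt]
      rw [hbody,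
        PySem.List.foldl_add (g := fun (i : Int) => PySem.Int.floordiv i 10 + PySem.Int.mod i 10),
        sum_pyRange_digits, if_neg (by omega : ¬ (m : Int) ≤ 0), if_neg hlt,
        PySem.Int.floordiv_eq_ediv_of_pos (by norm_num : (0:Int) < 10),
        PySem.Int.mod_eq_emod_of_pos (by norm_num : (0:Int) < 10),
        PySem.Int.floordiv_eq_ediv_of_pos (by norm_num : (0:Int) < 2),
        PySem.Int.floordiv_eq_ediv_of_pos (by norm_num : (0:Int) < 2)]
      unfold digitForm; ring
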